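-- pv_equiv track=rewrite | github.com/Kohei-Oyama/Kadai | kadai_5.py | cal_1
-- ===== SOURCE A (Python) =====
-- def cal_1(n):
--     # forループで全要素委確保するとだとn=5でもうしんどい
--     # 1つの要素に対して確保しても時間かかる
--     # 2の因数より5の因数の方が少ない
--     count_5 =0 #5の因数
--     max_n = 10**n
--     k = 5
--     while k <= max_n:
--         count_5 = count_5 + (max_n//2) // k
--         k = k*5
--     return count_5
-- ===== SOURCE B (Python) =====
-- def cal_1(n):
--     # Legendre's formula: the sum A computes is the exponent of 5 in m! with
--     # m = 10**n // 2, which equals (m - digitsum_base5(m)) // 4.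
--     if n < 0:
--         return 0
--     m = 10**n // 2
--     s = 0
--     t = m
--     while t > 0:
--         s += t % 5
--         t //= 5
--     return (m - s) // 4
-- ===== Notes on version B (the rewrite author's own statement) =====
-- stated objective: alternative
-- what changed: Replaces the divide-by-successive-powers-of-5 accumulation with Legendre's closed form: compute m = 10**n // 2, sum m's base-5 digits in one loop, and return (m - digitsum)//4.
import Mathlib
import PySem

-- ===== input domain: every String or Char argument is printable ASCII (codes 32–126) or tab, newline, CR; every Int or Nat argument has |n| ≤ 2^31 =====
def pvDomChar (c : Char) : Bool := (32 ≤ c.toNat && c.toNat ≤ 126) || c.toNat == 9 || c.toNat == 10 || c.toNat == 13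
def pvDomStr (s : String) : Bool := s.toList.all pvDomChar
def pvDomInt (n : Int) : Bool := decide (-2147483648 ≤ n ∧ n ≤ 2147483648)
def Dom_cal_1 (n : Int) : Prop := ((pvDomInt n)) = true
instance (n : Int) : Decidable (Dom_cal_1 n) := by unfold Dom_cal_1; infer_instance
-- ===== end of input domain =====

-- B replaces A's sum of quotients by successive 5-powers with Legendre's closed
-- form (m - base5digitsum m)/4 for m = 10^n // 2; same cost, different algorithm.

-- ===== PORT A =====
-- A's while loop: k runs over 5, 25, 125, … while k ≤ max_n, adding (max_n//2)//k.
-- All values are nonnegative Python ints, so Nat division is exact here.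
-- The `0 < k` conjunct is a pure totality guard: k starts at 5 and only grows.
def aLoop (maxn : Nat) (count : Nat) (k : Nat) : Nat :=
  if h : k ≤ maxn ∧ 0 < k then aLoop maxn (count + (maxn / 2) / k) (k * 5) else count
termination_by maxn + 1 - k
decreasing_by omega

-- For n < 0 Python's 10**n is a float in (0,1), so `5 <= max_n` is False, the
-- loop body never runs and A returns the int 0; the n < 0 branch is exact.
def cal_1 (n : Int) : Int :=
  if n < 0 then 0 else (aLoop (10 ^ n.toNat) 0 5 : Int)

-- ===== PORT B =====
-- B's digit-sum loop: while t > 0: s += t % 5; t //= 5.  All values nonnegative.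
def sLoop (t : Nat) (s : Nat) : Nat :=
  if 0 < t then sLoop (t / 5) (s + t % 5) else s

-- Source B: m - s is nonnegative (digit sum ≤ value) and (m-s)//4 on nonnegative
-- ints is Nat division, so the Nat computation is exact (m written out twice).
def cal_1_alt (n : Int) : Int :=
  if n < 0 then 0 else
    ((10 ^ n.toNat / 2 - sLoop (10 ^ n.toNat / 2) 0) / 4 : Nat)

-- ===== PRECONDITION & SPEC =====
def Spec_cal_1 (n : Int) (out : Int) : Prop := out = cal_1_alt n
instance (n : Int) (out : Int) : Decidable (Spec_cal_1 n out) := by unfold Spec_cal_1; infer_instance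

-- ===== CLAIM (what is proved, stated in full; the proofs are below) =====
def Claim_equal_cal_1 : Prop := ∀ (n : Int), Dom_cal_1 n → Spec_cal_1 n (cal_1 n)

-- ===== LEMMAS AND PROOFS =====

-- Legendre sum: Leg m = ∑_{i≥1} m / 5^i, written as structural recursion.
def Leg (m : Nat) : Nat :=
  if h : 0 < m then m / 5 + Leg (m / 5) else 0
termination_by m
decreasing_by exact Nat.div_lt_self h (by omega)

theorem leg_unfold (m : Nat) : Leg m = m / 5 + Leg (m / 5) := by
  rw [Leg]
  by_cases h : 0 < m
  · simp [h]
  · have hm : m = 0 := by omega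
    subst hm; simp [Leg]

theorem leg_small {m : Nat} (h : m < 5) : Leg m = 0 := by
  rw [leg_unfold]
  have h5 : m / 5 = 0 := Nat.div_eq_of_lt h
  rw [h5]; simp [Leg]

-- A's loop with k = 5*j computes count + Leg (maxn/2 / j).
-- d is an upper bound on maxn + 1 - 5*j, the loop's termination measure.
theorem aLoop_eq (maxn : Nat) : ∀ d j count, 0 < j → maxn + 1 ≤ 5 * j + d →
    aLoop maxn count (5 * j) = count + Leg (maxn / 2 / j) := by
  intro d
  induction d with
  | zero =>
    intro j count hj hd
    rw [aLoop, dif_neg (by omega)]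
    have h1 : maxn / 2 / j ≤ maxn / j := Nat.div_le_div_right (Nat.div_le_self _ _)
    have h2 : maxn / j < 5 := Nat.div_lt_of_lt_mul (by omega)
    rw [leg_small (by omega)]
    omega
  | succ d ih =>
    intro j count hj hd
    rw [aLoop]
    by_cases hle : 5 * j ≤ maxn
    · rw [dif_pos (show 5 * j ≤ maxn ∧ 0 < 5 * j from ⟨hle, by omega⟩)]
      have h1 : (5 * j) * 5 = 5 * (5 * j) := by ring
      rw [h1, ih (5 * j) _ (by omega) (by omega)]
      have h2 : maxn / 2 / j / 5 = maxn / 2 / (5 * j) := by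
        rw [Nat.div_div_eq_div_mul, Nat.mul_comm]
      rw [leg_unfold (maxn / 2 / j), h2]
      omega
    · rw [dif_neg (by omega)]
      have h1 : maxn / 2 / j ≤ maxn / j := Nat.div_le_div_right (Nat.div_le_self _ _)
      have h2 : maxn / j < 5 := Nat.div_lt_of_lt_mul (by omega)
      rw [leg_small (by omega)]
      omega

-- B's digit-sum loop: accumulator form.
theorem sLoop_acc (t : Nat) : ∀ s, sLoop t s = s + sLoop t 0 := by
  induction t using Nat.strong_induction_on with
  | _ t ih =>
    intro s
    by_cases h : 0 < t
    · rw [sLoop, if_pos h, ih (t / 5) (Nat.div_lt_self h (by omega)) (s + t % 5)]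
      conv_rhs => rw [sLoop, if_pos h, ih (t / 5) (Nat.div_lt_self h (by omega)) (0 + t % 5)]
      omega
    · rw [sLoop, if_neg h]
      conv_rhs => rw [sLoop, if_neg h]
      omega

-- Legendre's identity: m - digitsum₅ m = 4 * Leg m (with digitsum ≤ m).
theorem legendre (m : Nat) : sLoop m 0 ≤ m ∧ m - sLoop m 0 = 4 * Leg m := by
  induction m using Nat.strong_induction_on with
  | _ m ih =>
    by_cases h : 0 < m
    · have hlt : m / 5 < m := Nat.div_lt_self h (by omega)
      obtain ⟨ihle, iheq⟩ := ih (m / 5) hlt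
      have hs : sLoop m 0 = m % 5 + sLoop (m / 5) 0 := by
        rw [sLoop]; simp only [h, if_true]
        rw [sLoop_acc]; omega
      have hdecomp : m = 5 * (m / 5) + m % 5 := by omega
      constructor
      · omega
      · rw [hs, leg_unfold m]; omega
    · have hm : m = 0 := by omega
      subst hm
      constructor <;> simp [sLoop, Leg]

-- ===== VERDICT (by name: the statement is the Claim_ definition above) =====
theorem cal_1_spec : Claim_equal_cal_1 := by
  intro n _
  unfold Spec_cal_1 cal_1 cal_1_alt
  by_cases h : n < 0
  · simp [h]
  · have hA := aLoop_eq (10 ^ n.toNat) (10 ^ n.toNat) 1 0 (by omega) (by omega)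
    rw [Nat.mul_one] at hA
    obtain ⟨hle, heq⟩ := legendre (10 ^ n.toNat / 2)
    rw [if_neg h, if_neg h, hA, Nat.div_one, Nat.zero_add, heq,
        Nat.mul_div_cancel_left _ (by omega : (0:Nat) < 4)]
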